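-- pv_equiv track=rewrite | github.com/jeffking1998/RecommenderSystem | model_backup/MovieLens/RS_XiangLiang/Item_CF.py | cal_common_size
-- ===== SOURCE A (Python) =====
-- def cal_common_size(invertfile):
--     common_matrix = dict() ## a matrix works as a dict
--
--     for _, items in invertfile.items():
--         for it_a in items:
--             common_matrix[it_a] = common_matrix.get(it_a, dict())
--             for it_b in items:
--                 if it_a == it_b:
--                     continue
--                 common_matrix[it_a][it_b] = common_matrix[it_a].get(it_b, 0)
--                 common_matrix[it_a][it_b] += 1
--     return common_matrix
-- ===== SOURCE B (Python) =====
-- def cal_common_size(invertfile):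
--     common_matrix = dict()
--     for _, items in invertfile.items():
--         cnt = dict()
--         for it in items:
--             cnt[it] = cnt.get(it, 0) + 1
--         for a in cnt:
--             row = common_matrix.setdefault(a, dict())
--             for b in cnt:
--                 if b != a:
--                     row[b] = row.get(b, 0) + cnt[a] * cnt[b]
--     return common_matrix
-- ===== Notes on version B (the rewrite author's own statement) =====
-- stated objective: alternative
-- what changed: Per user, B first builds an occurrence counter of the item list and then updates each ordered pair of DISTINCT items once, adding the product of their multiplicities, instead of A's double loop over all (duplicated) item occurrences.
import Mathlib
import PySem

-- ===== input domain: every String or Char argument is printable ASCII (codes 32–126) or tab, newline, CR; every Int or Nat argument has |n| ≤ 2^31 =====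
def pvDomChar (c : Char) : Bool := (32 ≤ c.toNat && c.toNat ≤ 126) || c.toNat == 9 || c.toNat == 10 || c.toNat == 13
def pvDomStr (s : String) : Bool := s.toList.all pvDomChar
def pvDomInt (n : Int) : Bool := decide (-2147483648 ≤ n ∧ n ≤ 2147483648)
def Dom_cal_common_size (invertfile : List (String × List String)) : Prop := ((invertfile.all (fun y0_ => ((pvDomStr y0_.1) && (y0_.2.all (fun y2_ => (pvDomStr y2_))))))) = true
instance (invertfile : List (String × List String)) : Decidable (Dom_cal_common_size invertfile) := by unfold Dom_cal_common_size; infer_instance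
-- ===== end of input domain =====

-- B replaces A's double loop over all item occurrences by a per-user occurrence counter and one
-- update per ordered pair of distinct items (adding the product of the two multiplicities):
-- a different decomposition of the same co-occurrence count (objective: alternative).

-- ===== PORT A =====
def cal_common_size (invertfile : List (String × List String)) : List (String × List (String × Int)) :=
  let common_matrix : PySem.Dict String (PySem.Dict String Int) :=
    invertfile.foldl (fun cm p =>
      p.2.foldl (fun cm it_a =>
        let cm := cm.insert it_a (cm.getD it_a PySem.Dict.empty)
        p.2.foldl (fun cm it_b =>
          if it_a == it_b then cm
          else
            -- common_matrix[it_a][it_b] = common_matrix[it_a].get(it_b, 0)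
            let row := cm.getD it_a PySem.Dict.empty  -- key is present; getD is a total rendering
            let cm := cm.insert it_a (row.insert it_b (row.getD it_b 0))
            -- common_matrix[it_a][it_b] += 1
            let row := cm.getD it_a PySem.Dict.empty
            cm.insert it_a (row.insert it_b (row.getD it_b 0 + 1))) cm) cm) PySem.Dict.empty
  common_matrix.items.map (fun p => (p.1, p.2.items))

-- ===== PORT B =====
def cal_common_size_alt (invertfile : List (String × List String)) : List (String × List (String × Int)) :=
  let common_matrix : PySem.Dict String (PySem.Dict String Int) :=
    invertfile.foldl (fun cm p =>
      let cnt : PySem.Dict String Int :=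
        p.2.foldl (fun d it => d.insert it (d.getD it 0 + 1)) PySem.Dict.empty
      cnt.keys.foldl (fun cm a =>
        let cm := cm.setdefault a PySem.Dict.empty
        let row := cm.getD a PySem.Dict.empty   -- 'row' aliases common_matrix[a]; written back below
        let row := cnt.keys.foldl (fun row b =>
          if b == a then row
          else row.insert b (row.getD b 0 + cnt.getD a 0 * cnt.getD b 0)) row
        cm.insert a row) cm) PySem.Dict.empty
  common_matrix.items.map (fun p => (p.1, p.2.items))

-- ===== PRECONDITION & SPEC =====
def Spec_cal_common_size (invertfile : List (String × List String)) (out : List (String × List (String × Int))) : Prop := out = cal_common_size_alt invertfile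
instance (invertfile : List (String × List String)) (out : List (String × List (String × Int))) : Decidable (Spec_cal_common_size invertfile out) := by unfold Spec_cal_common_size; infer_instance

-- ===== CLAIM (what is proved, stated in full; the proofs are below) =====
def Claim_equal_cal_common_size : Prop := ∀ (invertfile : List (String × List String)), Dom_cal_common_size invertfile → Spec_cal_common_size invertfile (cal_common_size invertfile)

-- ===== LEMMAS AND PROOFS =====

-- a "keyed step": replace key a's value by a function of its old value (guarded by p)
theorem pv_insert_comm {kk vv : Type} [BEq kk] [LawfulBEq kk] (cm : PySem.Dict kk vv)
    (a a' : kk) (v v' : vv) (h : cm.contains a = true) (hne : a ≠ a') :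
    (cm.insert a v).insert a' v' = (cm.insert a' v').insert a v := by
  have hba : (a' == a) = false := by simp; exact fun e => hne e.symm
  have hca' : (cm.insert a v).contains a' = cm.contains a' := by
    rw [PySem.Dict.contains_insert]; simp [hba]
  have hca : (cm.insert a' v').contains a = true := by
    rw [PySem.Dict.contains_insert, h]; simp
  by_cases h' : cm.contains a' = true
  · apply PySem.Dict.ext
    rw [PySem.Dict.items_insert_of_contains _ v' (by rw [hca']; exact h'),
        PySem.Dict.items_insert_of_contains _ v h,
        PySem.Dict.items_insert_of_contains _ v hca,
        PySem.Dict.items_insert_of_contains _ v' h',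
        List.map_map, List.map_map]
    apply List.map_congr_left
    intro x _
    by_cases hx : x.1 = a <;> by_cases hx' : x.1 = a' <;>
      simp [Function.comp, hx, hx', hne, Ne.symm hne]
  · have h2 : cm.contains a' = false := by simpa using h'
    have h'' : (cm.insert a v).contains a' = false := by rw [hca']; exact h2
    apply PySem.Dict.ext
    rw [PySem.Dict.items_insert_of_not_contains _ v' h'',
        PySem.Dict.items_insert_of_contains _ v h,
        PySem.Dict.items_insert_of_contains _ v hca,
        PySem.Dict.items_insert_of_not_contains _ v' h2,
        List.map_append]
    congr 1
    simp [Ne.symm hne]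

def pvStep {kk vv : Type} [BEq kk] (p : kk → Bool) (g : kk → vv → vv) (d0 : vv)
    (cm : PySem.Dict kk vv) (a : kk) : PySem.Dict kk vv :=
  if p a then cm.insert a (g a (cm.getD a d0)) else cm

theorem pvStep_comm {kk vv : Type} [BEq kk] [LawfulBEq kk] (p : kk → Bool) (g : kk → vv → vv)
    (d0 : vv) (cm : PySem.Dict kk vv) (a b : kk) (h : p a = true → cm.contains a = true)
    (hne : a ≠ b) :
    pvStep p g d0 (pvStep p g d0 cm b) a = pvStep p g d0 (pvStep p g d0 cm a) b := by
  unfold pvStep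
  by_cases hpa : p a = true
  · by_cases hpb : p b = true
    · simp only [hpa, hpb, if_pos]
      rw [PySem.Dict.getD_insert_of_ne _ _ _ hne, PySem.Dict.getD_insert_of_ne _ _ _ (Ne.symm hne)]
      exact (pv_insert_comm cm a b _ _ (h hpa) hne).symm
    · simp [hpa, hpb]
  · by_cases hpb : p b = true <;> simp [hpa, hpb]

theorem pv_contains_pvStep_mono {kk vv : Type} [BEq kk] [LawfulBEq kk] (p : kk → Bool)
    (g : kk → vv → vv) (d0 : vv) (cm : PySem.Dict kk vv) (a k : kk)
    (h : cm.contains k = true) : (pvStep p g d0 cm a).contains k = true := by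
  unfold pvStep
  split
  · rw [PySem.Dict.contains_insert, h]; simp
  · exact h

theorem pv_iterate_comm {kk vv : Type} [BEq kk] [LawfulBEq kk] (p : kk → Bool) (g : kk → vv → vv)
    (d0 : vv) (cm : PySem.Dict kk vv) (a b : kk) (n : ℕ) (h : p a = true → cm.contains a = true)
    (hne : a ≠ b) :
    (fun c => pvStep p g d0 c a)^[n] (pvStep p g d0 cm b)
      = pvStep p g d0 ((fun c => pvStep p g d0 c a)^[n] cm) b := by
  induction n generalizing cm with
  | zero => simp
  | succ m ih =>
    rw [Function.iterate_succ_apply, Function.iterate_succ_apply]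
    have hgoal : pvStep p g d0 (pvStep p g d0 cm b) a = pvStep p g d0 (pvStep p g d0 cm a) b :=
      pvStep_comm p g d0 cm a b h hne
    rw [hgoal]
    exact ih (pvStep p g d0 cm a) (fun hp => by
      have hc := h hp
      simp only [pvStep, hp, if_pos]
      rw [PySem.Dict.contains_insert]; simp)

theorem pv_iterate_self {kk vv : Type} [BEq kk] [LawfulBEq kk] (p : kk → Bool) (g : kk → vv → vv)
    (d0 : vv) (cm : PySem.Dict kk vv) (a : kk) (n : ℕ) (hn : 1 ≤ n) :
    (fun c => pvStep p g d0 c a)^[n] cm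
      = if p a then cm.insert a ((g a)^[n] (cm.getD a d0)) else cm := by
  by_cases hpa : p a = true
  · induction n with
    | zero => omega
    | succ m ih =>
      rcases Nat.eq_or_lt_of_le hn with h1 | h1
      · simp only [← h1]
        unfold pvStep
        simp [hpa]
      · rw [Function.iterate_succ_apply', ih (by omega)]
        simp only [hpa, if_pos]
        show pvStep p g d0 _ a = _
        unfold pvStep
        simp only [hpa, if_pos]
        rw [PySem.Dict.getD_insert_self, PySem.Dict.insert_insert_self]
        congr 1
        exact (Function.iterate_succ_apply' (g a) m _).symm
  · have hid : (fun c => pvStep p g d0 c a) = id := by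
      funext c; unfold pvStep; simp [hpa]
    rw [hid, Function.iterate_id]
    simp [hpa]

theorem pv_extract {kk vv : Type} [BEq kk] [LawfulBEq kk] (p : kk → Bool) (g : kk → vv → vv)
    (d0 : vv) (a : kk) :
    ∀ (l : List kk) (cm : PySem.Dict kk vv), (p a = true → cm.contains a = true) →
    l.foldl (pvStep p g d0) cm
      = (l.filter (fun b => !(b == a))).foldl (pvStep p g d0)
          ((fun c => pvStep p g d0 c a)^[l.count a] cm) := by
  intro l
  induction l with
  | nil => intro cm h; simp
  | cons b tl ih =>
    intro cm h
    by_cases hb : b = a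
    · subst hb
      rw [List.foldl_cons, ih (pvStep p g d0 cm b) (fun hp => by
            simp only [pvStep, hp, if_pos]
            rw [PySem.Dict.contains_insert]; simp)]
      have hc : (b :: tl).count b = tl.count b + 1 := by simp
      rw [hc, Function.iterate_succ_apply]
      have : List.filter (fun x => !(x == b)) (b :: tl) = List.filter (fun x => !(x == b)) tl := by
        simp
      rw [this]
    · rw [List.foldl_cons, ih (pvStep p g d0 cm b) (fun hp =>
            pv_contains_pvStep_mono p g d0 cm b a (h hp))]
      rw [pv_iterate_comm p g d0 cm a b _ h (Ne.symm hb)]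
      have hcnt : (b :: tl).count a = tl.count a := by
        simp [List.count_cons]
        intro e; exact absurd e hb
      have hflt : List.filter (fun x => !(x == a)) (b :: tl)
          = b :: List.filter (fun x => !(x == a)) tl := by
        simp [hb]
      rw [hcnt, hflt, List.foldl_cons]

theorem pv_dedup_cons {kk : Type} [BEq kk] [LawfulBEq kk] (a : kk) (tl : List kk) :
    PySem.List.dedup (a :: tl) = a :: (PySem.List.dedup tl).filter (fun b => !(b == a)) := by
  rw [PySem.List.dedup_eq_ofList, PySem.List.dedup_eq_ofList]
  have h0 : a :: tl = [a] ++ tl := rfl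
  rw [h0, PySem.Set.ofList_append]
  have h1 : PySem.Set.ofList [a] = [a] := by
    simp [PySem.Set.ofList, PySem.Set.add, PySem.Set.empty]
  rw [h1, PySem.Set.update_eq_append_filter]
  have h2 : ∀ b : kk, PySem.Set.contains [a] b = (b == a) := by
    intro b; simp [PySem.Set.contains]
  simp only [h2]
  rfl

theorem pv_dedup_filter {kk : Type} [BEq kk] [LawfulBEq kk] (q : kk → Bool) :
    ∀ tl : List kk, PySem.List.dedup (tl.filter q) = (PySem.List.dedup tl).filter q := by
  intro tl
  induction tl with
  | nil => simp [PySem.List.dedup, PySem.Set.ofList]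
  | cons b tl ih =>
    by_cases hq : q b = true
    · rw [List.filter_cons_of_pos hq, pv_dedup_cons, pv_dedup_cons, ih,
          List.filter_cons_of_pos hq, List.filter_filter, List.filter_filter]
      congr 1
      apply List.filter_congr
      intro x _
      rw [Bool.and_comm]
    · rw [List.filter_cons_of_neg (by simpa using hq), pv_dedup_cons, ih,
          List.filter_cons_of_neg (by simpa using hq), List.filter_filter]
      apply List.filter_congr
      intro x _
      by_cases hxb : x = b
      · subst hxb; simp [hq]
      · simp [hxb]

theorem pv_group {kk vv : Type} [BEq kk] [LawfulBEq kk] (p : kk → Bool) (g : kk → vv → vv)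
    (d0 : vv) : ∀ (n : ℕ) (l : List kk), l.length ≤ n → ∀ (cm : PySem.Dict kk vv),
    l.foldl (pvStep p g d0) cm
      = (PySem.List.dedup l).foldl
          (fun cm a => if p a then cm.insert a ((g a)^[l.count a] (cm.getD a d0)) else cm) cm := by
  intro n
  induction n with
  | zero =>
    intro l hl cm
    have : l = [] := List.eq_nil_of_length_eq_zero (by omega)
    subst this; simp [PySem.List.dedup, PySem.Set.ofList]
  | succ n ih =>
    intro l hl cm
    match l with
    | [] => simp [PySem.List.dedup, PySem.Set.ofList]
    | a :: tl =>
      rw [List.foldl_cons]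
      rw [pv_extract p g d0 a tl (pvStep p g d0 cm a) (fun hp => by
            simp only [pvStep, hp, if_pos]
            rw [PySem.Dict.contains_insert]; simp)]
      set l' := tl.filter (fun b => !(b == a)) with hl'
      have hlen : l'.length ≤ n := le_trans (List.length_filter_le _ _) (by simpa using hl)
      rw [ih l' hlen]
      -- collapse the a-iterations
      have hit : (fun c => pvStep p g d0 c a)^[tl.count a] (pvStep p g d0 cm a)
          = if p a then cm.insert a ((g a)^[(a :: tl).count a] (cm.getD a d0)) else cm := by
        rw [← Function.iterate_succ_apply, pv_iterate_self p g d0 cm a _ (by omega)]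
        have : (tl.count a).succ = (a :: tl).count a := by simp
        rw [this]
      rw [hit]
      -- assemble the RHS
      rw [pv_dedup_cons, ← pv_dedup_filter, List.foldl_cons]
      apply PySem.List.foldl_congr_mem
      intro acc x hx
      have hxa : x ≠ a := by
        have := (PySem.List.mem_dedup _ _).1 hx
        rcases List.mem_filter.1 this with ⟨_, hq⟩
        simpa using hq
      have hc2 : l'.count x = (a :: tl).count x := by
        rw [hl', List.count_filter (by simp [hxa])]
        simp [Ne.symm hxa]
      rw [hc2]

theorem pv_add_one_iter (n : ℕ) (x : ℤ) : (fun v : ℤ => v + 1)^[n] x = x + n := by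
  induction n generalizing x with
  | zero => simp
  | succ m ih => rw [Function.iterate_succ_apply, ih]; push_cast; ring

theorem pv_flatten_replicate_foldl {α β : Type} (f : β → α → β) (l : List α) :
    ∀ (m : ℕ) (r : β), (List.flatten (List.replicate m l)).foldl f r = (fun r => l.foldl f r)^[m] r := by
  intro m
  induction m with
  | zero => simp
  | succ k ih =>
    intro r
    rw [List.replicate_succ, List.flatten_cons, List.foldl_append, Function.iterate_succ_apply, ← ih]

theorem pv_count_flatten_replicate {kk : Type} [BEq kk] (l : List kk) (b : kk) :
    ∀ m : ℕ, (List.flatten (List.replicate m l)).count b = m * l.count b := by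
  intro m
  induction m with
  | zero => simp
  | succ k ih =>
    rw [List.replicate_succ, List.flatten_cons, List.count_append, ih]
    ring

theorem pv_dedup_flatten_replicate {kk : Type} [BEq kk] [LawfulBEq kk] (l : List kk) (m : ℕ)
    (hm : 1 ≤ m) :
    PySem.List.dedup (List.flatten (List.replicate m l)) = PySem.List.dedup l := by
  obtain ⟨k, rfl⟩ : ∃ k, m = k + 1 := ⟨m - 1, by omega⟩
  rw [List.replicate_succ, List.flatten_cons, PySem.List.dedup_eq_ofList,
      PySem.Set.ofList_append, PySem.Set.update_eq_append_filter, PySem.List.dedup_eq_ofList]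
  have : List.filter (fun y => !(PySem.Set.ofList l).contains y)
      (PySem.Set.ofList (List.flatten (List.replicate k l))) = [] := by
    rw [List.filter_eq_nil_iff]
    intro y hy
    have hyl : y ∈ l := by
      have := (PySem.Set.mem_ofList _ _).1 hy
      rcases List.mem_flatten.1 this with ⟨s, hs, hys⟩
      rwa [(List.eq_of_mem_replicate hs)] at hys
    simp [PySem.Set.contains, (PySem.Set.mem_ofList l y).2 hyl]
  rw [this, List.append_nil]

theorem pvA_inner_collapse (a : String) :
    ∀ (l : List String) (cm : PySem.Dict String (PySem.Dict String ℤ)) (r : PySem.Dict String ℤ),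
    l.foldl (fun cm it_b =>
        if a == it_b then cm
        else
          let row := cm.getD a PySem.Dict.empty
          let cm := cm.insert a (row.insert it_b (row.getD it_b 0))
          let row := cm.getD a PySem.Dict.empty
          cm.insert a (row.insert it_b (row.getD it_b 0 + 1))) (cm.insert a r)
      = cm.insert a (l.foldl (fun r b =>
          if (!(a == b)) then r.insert b (r.getD b 0 + 1) else r) r) := by
  intro l
  induction l with
  | nil => intro cm r; simp
  | cons b tl ih =>
    intro cm r
    rw [List.foldl_cons, List.foldl_cons]
    by_cases hab : a = b
    · have hb : (a == b) = true := by simp [hab]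
      simp only [hb, if_true, Bool.not_true, Bool.false_eq_true, if_false]
      exact ih cm r
    · have hb : (a == b) = false := by simpa using hab
      simp only [hb, Bool.false_eq_true, if_false, Bool.not_false, if_true]
      have hacc :
          (let row := (cm.insert a r).getD a PySem.Dict.empty
           let cm2 := (cm.insert a r).insert a (row.insert b (row.getD b 0))
           let row := cm2.getD a PySem.Dict.empty
           cm2.insert a (row.insert b (row.getD b 0 + 1)))
            = cm.insert a (r.insert b (r.getD b 0 + 1)) := by
        simp only [PySem.Dict.getD_insert_self, PySem.Dict.insert_insert_self]
      rw [hacc]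
      exact ih cm (r.insert b (r.getD b 0 + 1))

theorem pv_key (l : List String) (a : String) (ha : a ∈ l) (r : PySem.Dict String ℤ) :
    (fun r => l.foldl (fun r b => if (!(a == b)) then r.insert b (r.getD b 0 + 1) else r) r)^[l.count a] r
      = (PySem.List.dedup l).foldl (fun r b =>
          if b == a then r
          else r.insert b (r.getD b 0 + (l.count a : ℤ) * (l.count b : ℤ))) r := by
  have hm : 1 ≤ l.count a := List.count_pos_iff.2 ha
  have hfold : ∀ r' : PySem.Dict String ℤ,
      l.foldl (fun r b => if (!(a == b)) then r.insert b (r.getD b 0 + 1) else r) r'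
        = l.foldl (pvStep (fun b => !(a == b)) (fun _ v => v + 1) 0) r' := by
    intro r'
    apply PySem.List.foldl_congr_mem
    intro acc x _
    simp [pvStep]
  simp only [hfold]
  rw [← pv_flatten_replicate_foldl (pvStep (fun b => !(a == b)) (fun _ v => v + 1) 0) l (l.count a) r]
  rw [pv_group (fun b => !(a == b)) (fun _ v => v + 1) 0
      (List.flatten (List.replicate (l.count a) l)).length _ (le_refl _) r]
  rw [pv_dedup_flatten_replicate l (l.count a) hm]
  apply PySem.List.foldl_congr_mem
  intro acc x _
  by_cases hxa : x = a
  · simp [hxa]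
  · have h1 : (!(a == x)) = true := by simp [Ne.symm hxa]
    have h2 : (x == a) = false := by simpa using hxa
    simp only [h1, if_true, h2, Bool.false_eq_true, if_false]
    rw [pv_count_flatten_replicate, pv_add_one_iter]
    push_cast
    ring_nf

theorem pvB_body_collapse (a : String) (cm : PySem.Dict String (PySem.Dict String ℤ))
    (F : PySem.Dict String ℤ → PySem.Dict String ℤ) :
    (cm.setdefault a PySem.Dict.empty).insert a
        (F ((cm.setdefault a PySem.Dict.empty).getD a PySem.Dict.empty))
      = cm.insert a (F (cm.getD a PySem.Dict.empty)) := by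
  by_cases hc : cm.contains a = true
  · simp only [PySem.Dict.setdefault_of_contains _ _ hc]
  · have hc' : cm.contains a = false := by simpa using hc
    simp only [PySem.Dict.setdefault_of_not_contains _ _ hc',
      PySem.Dict.getD_insert_self, PySem.Dict.insert_insert_self,
      PySem.Dict.getD_of_not_contains _ _ hc']

theorem pv_user (l : List String) (cm : PySem.Dict String (PySem.Dict String ℤ)) :
    l.foldl (fun cm it_a =>
      let cm := cm.insert it_a (cm.getD it_a PySem.Dict.empty)
      l.foldl (fun cm it_b =>
        if it_a == it_b then cm
        else
          let row := cm.getD it_a PySem.Dict.empty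
          let cm := cm.insert it_a (row.insert it_b (row.getD it_b 0))
          let row := cm.getD it_a PySem.Dict.empty
          cm.insert it_a (row.insert it_b (row.getD it_b 0 + 1))) cm) cm
    = (let cnt : PySem.Dict String ℤ :=
        l.foldl (fun d it => d.insert it (d.getD it 0 + 1)) PySem.Dict.empty
       cnt.keys.foldl (fun cm a =>
        let cm := cm.setdefault a PySem.Dict.empty
        let row := cm.getD a PySem.Dict.empty
        let row := cnt.keys.foldl (fun row b =>
          if b == a then row
          else row.insert b (row.getD b 0 + cnt.getD a 0 * cnt.getD b 0)) row
        cm.insert a row) cm) := by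
  -- B side: identify the counter and its keys
  rw [show (l.foldl (fun d it => d.insert it (d.getD it 0 + 1)) PySem.Dict.empty)
      = PySem.Dict.counter l from PySem.Dict.foldl_insert_getD_add_one_eq_counter l]
  simp only [PySem.Dict.keys_counter, ← PySem.List.dedup_eq_ofList, PySem.Dict.getD_counter]
  -- A side: collapse the inner double-write loop, then group equal keys
  have hA : l.foldl (fun cm it_a =>
      let cm := cm.insert it_a (cm.getD it_a PySem.Dict.empty)
      l.foldl (fun cm it_b =>
        if it_a == it_b then cm
        else
          let row := cm.getD it_a PySem.Dict.empty
          let cm := cm.insert it_a (row.insert it_b (row.getD it_b 0))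
          let row := cm.getD it_a PySem.Dict.empty
          cm.insert it_a (row.insert it_b (row.getD it_b 0 + 1))) cm) cm
      = l.foldl (pvStep (fun _ => true)
          (fun a r => l.foldl (fun r b => if (!(a == b)) then r.insert b (r.getD b 0 + 1) else r) r)
          PySem.Dict.empty) cm := by
    apply PySem.List.foldl_congr_mem
    intro acc x _
    show (l.foldl _ (acc.insert x (acc.getD x PySem.Dict.empty))) = _
    rw [pvA_inner_collapse x l acc (acc.getD x PySem.Dict.empty)]
    simp [pvStep]
  rw [hA, pv_group _ _ _ l.length l (le_refl _) cm]
  -- per distinct key: B's body collapses, then the iterated pass equals the product pass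
  apply PySem.List.foldl_congr_mem
  intro acc x hx
  rw [pvB_body_collapse x acc (fun r =>
    (PySem.List.dedup l).foldl (fun row b =>
      if b == x then row
      else row.insert b (row.getD b 0 + (l.count x : ℤ) * (l.count b : ℤ))) r)]
  simp only [if_true]
  congr 1
  exact pv_key l x ((PySem.List.mem_dedup _ _).1 hx) _

-- ===== VERDICT (by name: the statement is the Claim_ definition above) =====
theorem cal_common_size_spec : Claim_equal_cal_common_size := by
  intro invertfile _
  unfold Spec_cal_common_size cal_common_size cal_common_size_alt
  have h : ∀ (cm : PySem.Dict String (PySem.Dict String ℤ)),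
      invertfile.foldl (fun cm p =>
        p.2.foldl (fun cm it_a =>
          let cm := cm.insert it_a (cm.getD it_a PySem.Dict.empty)
          p.2.foldl (fun cm it_b =>
            if it_a == it_b then cm
            else
              let row := cm.getD it_a PySem.Dict.empty
              let cm := cm.insert it_a (row.insert it_b (row.getD it_b 0))
              let row := cm.getD it_a PySem.Dict.empty
              cm.insert it_a (row.insert it_b (row.getD it_b 0 + 1))) cm) cm) cm
      = invertfile.foldl (fun cm p =>
          let cnt : PySem.Dict String ℤ :=
            p.2.foldl (fun d it => d.insert it (d.getD it 0 + 1)) PySem.Dict.empty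
          cnt.keys.foldl (fun cm a =>
            let cm := cm.setdefault a PySem.Dict.empty
            let row := cm.getD a PySem.Dict.empty
            let row := cnt.keys.foldl (fun row b =>
              if b == a then row
              else row.insert b (row.getD b 0 + cnt.getD a 0 * cnt.getD b 0)) row
            cm.insert a row) cm) cm := by
    intro cm
    apply PySem.List.foldl_congr_mem
    intro acc p _
    exact pv_user p.2 acc
  simp only [h]
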